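-- pv_equiv track=rewrite | github.com/Albertogf4/AZIA_Agents | backend/api/services/vector_db_utils.py | split_paragraphs_and_tables
-- ===== SOURCE A (Python) =====
-- def split_paragraphs_and_tables(section):
--     """
--     Dentro de cada sección, divide en "bloques":
--     - Tablas: líneas consecutivas que empiezan con '|'
--     - Párrafos: bloques de texto separados por línea en blanco
--     """
--     lines = section.split('\n')
--     blocks = []
--     i = 0
--     n = len(lines)
--
--     while i < n:
--         # Si la línea inicia con '|', agrupa todas las líneas de tabla consecutivas
--         if lines[i].startswith('|'):
--             tbl_lines = []
--             while i < n and lines[i].startswith('|'):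
--                 tbl_lines.append(lines[i])
--                 i += 1
--             blocks.append('\n'.join(tbl_lines).strip())
--
--         else:
--             # Agrupa todas las líneas hasta un salto de línea (línea vacía) o inicio de tabla
--             para_lines = []
--             while i < n and lines[i].strip() != '' and not lines[i].startswith('|'):
--                 para_lines.append(lines[i])
--                 i += 1
--             blocks.append('\n'.join(para_lines).strip())
--             # Saltar líneas vacías
--             while i < n and lines[i].strip() == '':
--                 i += 1
--
--     # Filtrar bloques vacíos
--     return [b for b in blocks if b.strip()]
-- ===== SOURCE B (Python) =====
-- def split_paragraphs_and_tables(section):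
--     # Staged decomposition instead of A's single nested-while state machine:
--     # stage 1 cuts the line list at blank lines, stage 2 cuts each segment where
--     # the table flag flips, stage 3 joins/strips and drops empty blocks.
--     segments = []
--     seg = []
--     for line in section.split('\n'):
--         if line.strip() != '':
--             seg.append(line)
--         else:
--             segments.append(seg)
--             seg = []
--     segments.append(seg)
--
--     blocks = []
--     for s in segments:
--         piece = []
--         for line in s:
--             if piece and piece[-1].startswith('|') != line.startswith('|'):
--                 blocks.append(piece)
--                 piece = [line]
--             else:
--                 piece.append(line)
--         if piece:
--             blocks.append(piece)
--
--     out = ['\n'.join(p).strip() for p in blocks]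
--     return [b for b in out if b.strip()]
-- ===== Notes on version B (the rewrite author's own statement) =====
-- stated objective: alternative
-- what changed: Replaces A's single-pass index-driven state machine (nested whiles with manual i bookkeeping and three-way line classification) by three staged passes: first cut the line list at blank lines into segments, then cut each segment where the table flag (line begins with a pipe character) flips, finally join/strip each block and filter empties.
import Mathlib
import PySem

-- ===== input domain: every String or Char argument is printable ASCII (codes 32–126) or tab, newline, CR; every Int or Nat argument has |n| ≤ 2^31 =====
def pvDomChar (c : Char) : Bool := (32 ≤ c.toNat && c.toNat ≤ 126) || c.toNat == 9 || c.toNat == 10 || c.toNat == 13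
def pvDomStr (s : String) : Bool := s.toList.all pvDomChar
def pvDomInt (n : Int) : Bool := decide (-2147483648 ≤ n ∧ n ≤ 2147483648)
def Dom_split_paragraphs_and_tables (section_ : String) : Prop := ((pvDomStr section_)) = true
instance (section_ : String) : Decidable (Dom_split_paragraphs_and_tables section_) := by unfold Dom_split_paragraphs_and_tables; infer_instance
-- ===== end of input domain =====

-- B replaces A's single-pass index-driven state machine by three staged passes:
-- cut the line list at blank lines into segments, cut each segment where the
-- startswith('|') flag flips, then join/strip each block and filter empties.


-- ===== PORT A =====
-- lines[i].startswith('|')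
def pvAIsTable (l : String) : Bool := PySem.Str.startswith l "|"
-- lines[i].strip() == ''
def pvAIsBlank (l : String) : Bool := PySem.Str.strip l == ""

-- termination helpers for A's outer loop (cited by decreasing_by)
theorem pv_dec1 (p : String → Bool) (l : String) (t : List String) (h : p l = true) :
    (List.dropWhile p (l :: t)).length < (l :: t).length := by
  rw [List.dropWhile_cons_of_pos h]
  exact Nat.lt_succ_of_le (List.length_dropWhile_le _ _)

theorem pv_dec2 (p q : String → Bool) (l : String) (t : List String)
    (h : p l = true ∨ q l = true) :
    ((List.dropWhile p (l :: t)).dropWhile q).length < (l :: t).length := by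
  by_cases hp : p l = true
  · rw [List.dropWhile_cons_of_pos hp]
    exact Nat.lt_succ_of_le (le_trans (List.length_dropWhile_le _ _) (List.length_dropWhile_le _ _))
  · rcases h with h | h
    · exact absurd h hp
    · rw [List.dropWhile_cons_of_neg hp, List.dropWhile_cons_of_pos h]
      exact Nat.lt_succ_of_le (List.length_dropWhile_le _ _)

-- A's outer while over the remaining lines; the three inner whiles are the obvious
-- takeWhile/dropWhile over the same remaining-lines state.
def pvALoop : List String → List String
  | [] => []
  | l :: t =>
    if h : pvAIsTable l then
      -- table branch: collect consecutive '|' lines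
      PySem.Str.strip (PySem.Str.join "\n" ((l :: t).takeWhile pvAIsTable)) ::
        pvALoop ((l :: t).dropWhile pvAIsTable)
    else
      -- paragraph branch: collect until blank line or table start, then skip blank lines
      PySem.Str.strip (PySem.Str.join "\n"
          ((l :: t).takeWhile (fun x => !pvAIsBlank x && !pvAIsTable x))) ::
        pvALoop (((l :: t).dropWhile (fun x => !pvAIsBlank x && !pvAIsTable x)).dropWhile pvAIsBlank)
  termination_by ls => ls.length
  decreasing_by
  · exact pv_dec1 _ l t h
  · refine pv_dec2 _ _ l t ?_
    by_cases hb : pvAIsBlank l = true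
    · exact Or.inr hb
    · exact Or.inl (by simp [hb, h])

-- section.split('\n'); sep "\n" ≠ "" so split? is always some (exact)
def split_paragraphs_and_tables (section_ : String) : List String :=
  let lines := (PySem.Str.split? section_ "\n").getD []
  (pvALoop lines).filter (fun b => !(PySem.Str.strip b == ""))

-- ===== PORT B =====
-- stage 1: the for-loop cutting the line list at blank lines (state: segments, seg);
-- the recursion carries the same seg accumulator and emits segments in order.
def pvStage1 : List String → List String → List (List String)
  | [], seg => [seg]
  | l :: t, seg =>
    if PySem.Str.strip l ≠ "" then pvStage1 t (seg ++ [l])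
    else seg :: pvStage1 t []

-- stage 2 inner for-loop over one segment (state: blocks-so-far suffix, piece);
-- piece[-1] is piece.getLastD "" (guarded by piece nonempty as in the Python test).
def pvCuts : List String → List String → List (List String)
  | [], piece => if piece = [] then [] else [piece]
  | l :: t, piece =>
    if piece ≠ [] ∧
        PySem.Str.startswith (piece.getLastD "") "|" ≠ PySem.Str.startswith l "|" then
      piece :: pvCuts t [l]
    else pvCuts t (piece ++ [l])

def split_paragraphs_and_tables_alt (section_ : String) : List String :=
  let lines := (PySem.Str.split? section_ "\n").getD []
  let blocks := (pvStage1 lines []).flatMap (fun s => pvCuts s [])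
  (blocks.map (fun p => PySem.Str.strip (PySem.Str.join "\n" p))).filter
    (fun b => !(PySem.Str.strip b == ""))

-- ===== PRECONDITION & SPEC =====
def Spec_split_paragraphs_and_tables (section_ : String) (out : List String) : Prop := out = split_paragraphs_and_tables_alt section_
instance (section_ : String) (out : List String) : Decidable (Spec_split_paragraphs_and_tables section_ out) := by unfold Spec_split_paragraphs_and_tables; infer_instance

-- ===== CLAIM (what is proved, stated in full; the proofs are below) =====
def Claim_equal_split_paragraphs_and_tables : Prop := ∀ (section_ : String), Dom_split_paragraphs_and_tables section_ → Spec_split_paragraphs_and_tables section_ (split_paragraphs_and_tables section_)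

-- ===== LEMMAS AND PROOFS =====

-- proof-side abbreviations
def pvNb (x : String) : Bool := !(PySem.Str.strip x == "")
def pvJs (p : List String) : String := PySem.Str.strip (PySem.Str.join "\n" p)

-- a line that starts with '|' does not strip to "" ('|' is not whitespace)
theorem pv_table_not_blank (l : String) (h : pvAIsTable l = true) : pvAIsBlank l = false := by
  unfold pvAIsTable PySem.Str.startswith at h
  have hpre : ('|' :: ([] : List Char)) <+: l.toList := by
    have := (PySem.Chars.startswith_iff l.toList "|".toList).mp h
    simpa using this
  obtain ⟨t, ht⟩ := hpre
  unfold pvAIsBlank PySem.Str.strip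
  unfold PySem.Chars.strip PySem.Chars.lstrip PySem.Chars.rstrip
  rw [← ht]
  have h1 : List.dropWhile PySem.Chars.isspace (['|'] ++ t) = '|' :: t := by
    rw [List.singleton_append, List.dropWhile_cons_of_neg (by decide)]
  rw [h1]
  have hne : (List.dropWhile PySem.Chars.isspace (('|' :: t).reverse)).reverse ≠ [] := by
    intro hc
    have h2 : List.dropWhile PySem.Chars.isspace (('|' :: t).reverse) = [] := by
      simpa using congrArg List.reverse hc
    have h3 := (List.dropWhile_eq_nil_iff).mp h2 '|' (by simp)
    exact absurd h3 (by decide)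
  rw [beq_eq_false_iff_ne]
  intro hc
  exact hne (by simpa using congrArg String.toList hc)

-- proof-side mirror of A's grouping: maximal runs of equal kind (0 table, 1 blank, 2 para)
def pvKind (l : String) : Nat :=
  if PySem.Str.startswith l "|" then 0
  else if PySem.Str.strip l == "" then 1
  else 2

def pvGroups : List String → List (Nat × List String)
  | [] => []
  | l :: t =>
    (pvKind l, l :: t.takeWhile (fun x => pvKind x == pvKind l)) ::
      pvGroups (t.dropWhile (fun x => pvKind x == pvKind l))
  termination_by ls => ls.length
  decreasing_by
    exact Nat.lt_succ_of_le (List.length_dropWhile_le _ _)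

def pvBBlocks : List (Nat × List String) → List String
  | [] => []
  | (k, run) :: gs =>
    if k != 1 then pvJs run :: pvBBlocks gs
    else pvBBlocks gs

-- the three values of pvKind, characterised against A's two tests
theorem pv_kind_cases (x : String) :
    (pvKind x == 0) = pvAIsTable x ∧ (pvKind x == 1) = pvAIsBlank x ∧
      (pvKind x == 2) = (!pvAIsBlank x && !pvAIsTable x) := by
  by_cases hx : pvAIsTable x = true
  · have hnb : pvAIsBlank x = false := pv_table_not_blank x hx
    have hx' : PySem.Str.startswith x "|" = true := hx
    unfold pvKind
    rw [if_pos hx']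
    simp [hx, hnb]
  · have hx' : PySem.Str.startswith x "|" = false := by
      cases hc : pvAIsTable x
      · exact hc
      · exact absurd hc hx
    unfold pvKind
    rw [if_neg (by simpa using hx')]
    by_cases hs : pvAIsBlank x = true
    · rw [if_pos (show (PySem.Str.strip x == "") = true from hs)]
      simp [hs, show pvAIsTable x = false from hx']
    · have hs' : pvAIsBlank x = false := by
        cases hc : pvAIsBlank x
        · rfl
        · exact absurd hc hs
      rw [if_neg (by simp [show (PySem.Str.strip x == "") = false from hs'])]
      simp [hs', show pvAIsTable x = false from hx']

theorem pv_kind_zero (l : String) (h : pvKind l = 0) :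
    (fun x => pvKind x == pvKind l) = pvAIsTable := by
  funext x; rw [h]; exact (pv_kind_cases x).1

theorem pv_kind_one (l : String) (h : pvKind l = 1) :
    (fun x => pvKind x == pvKind l) = pvAIsBlank := by
  funext x; rw [h]; exact (pv_kind_cases x).2.1

theorem pv_kind_two (l : String) (h : pvKind l = 2) :
    (fun x => pvKind x == pvKind l) = (fun x => !pvAIsBlank x && !pvAIsTable x) := by
  funext x; rw [h]; exact (pv_kind_cases x).2.2

-- skipping a leading blank run does not change the grouped blocks
theorem pv_groups_drop_blank (ls : List String) :
    pvBBlocks (pvGroups (ls.dropWhile pvAIsBlank)) = pvBBlocks (pvGroups ls) := by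
  cases ls with
  | nil => rfl
  | cons l t =>
    by_cases hb : pvAIsBlank l = true
    · have htab : pvAIsTable l = false := by
        cases hx : pvAIsTable l
        · rfl
        · exact absurd hb (by simp [pv_table_not_blank l hx])
      have hk : pvKind l = 1 := by
        unfold pvKind
        rw [if_neg (by simpa using (show PySem.Str.startswith l "|" = false from htab))]
        rw [if_pos (show (PySem.Str.strip l == "") = true from hb)]
      rw [List.dropWhile_cons_of_pos hb]
      rw [pvGroups, pv_kind_one l hk, pvBBlocks, hk, if_neg (by decide)]
    · rw [List.dropWhile_cons_of_neg hb]

-- A's loop (with the final filter) equals the grouped blocks (with the same filter)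
theorem pv_core (n : Nat) : ∀ ls : List String, ls.length ≤ n →
    (pvALoop ls).filter (fun b => !(PySem.Str.strip b == "")) =
      (pvBBlocks (pvGroups ls)).filter (fun b => !(PySem.Str.strip b == "")) := by
  induction n with
  | zero =>
    intro ls hl
    have hnil : ls = [] := List.eq_nil_of_length_eq_zero (Nat.le_zero.mp hl)
    subst hnil
    simp [pvALoop, pvGroups, pvBBlocks]
  | succ n ih =>
    intro ls hl
    cases ls with
    | nil => simp [pvALoop, pvGroups, pvBBlocks]
    | cons l t =>
      have hl' : t.length ≤ n := Nat.lt_succ_iff.mp (by simpa using hl)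
      by_cases htab : pvAIsTable l = true
      · -- table run
        have hk : pvKind l = 0 := by
          unfold pvKind
          rw [if_pos (show PySem.Str.startswith l "|" = true from htab)]
        rw [pvALoop, dif_pos htab]
        rw [pvGroups, pv_kind_zero l hk, pvBBlocks, hk, if_pos (by decide)]
        rw [List.takeWhile_cons_of_pos htab, List.dropWhile_cons_of_pos htab]
        simp only [List.filter_cons, pvJs]
        rw [ih (t.dropWhile pvAIsTable) (le_trans (List.length_dropWhile_le _ _) hl')]
      · have htab' : pvAIsTable l = false := by
          cases hc : pvAIsTable l
          · rfl
          · exact absurd hc htab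
        by_cases hbl : pvAIsBlank l = true
        · -- blank run: A emits "" (filtered out) and skips the blanks; groups skip the run
          have hk : pvKind l = 1 := by
            unfold pvKind
            rw [if_neg (by simpa using (show PySem.Str.startswith l "|" = false from htab'))]
            rw [if_pos (show (PySem.Str.strip l == "") = true from hbl)]
          have hq : (!pvAIsBlank l && !pvAIsTable l) = false := by simp [hbl]
          rw [pvALoop, dif_neg htab]
          rw [List.takeWhile_cons_of_neg (by simpa using hq),
            List.dropWhile_cons_of_neg (by simpa using hq), List.dropWhile_cons_of_pos hbl]
          rw [pvGroups, pv_kind_one l hk, pvBBlocks, hk, if_neg (by decide)]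
          simp only [List.filter_cons]
          rw [if_neg (by decide)]
          exact ih (t.dropWhile pvAIsBlank) (le_trans (List.length_dropWhile_le _ _) hl')
        · -- paragraph run
          have hbl' : pvAIsBlank l = false := by
            cases hc : pvAIsBlank l
            · rfl
            · exact absurd hc hbl
          have hk : pvKind l = 2 := by
            unfold pvKind
            rw [if_neg (by simpa using (show PySem.Str.startswith l "|" = false from htab'))]
            rw [if_neg (by simp [show (PySem.Str.strip l == "") = false from hbl'])]
          have hq : (!pvAIsBlank l && !pvAIsTable l) = true := by simp [hbl', htab']
          rw [pvALoop, dif_neg htab]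
          rw [List.takeWhile_cons_of_pos (by simpa using hq),
            List.dropWhile_cons_of_pos (by simpa using hq)]
          rw [pvGroups, pv_kind_two l hk, pvBBlocks, hk, if_pos (by decide)]
          simp only [List.filter_cons, pvJs]
          rw [← pv_groups_drop_blank (t.dropWhile (fun x => !pvAIsBlank x && !pvAIsTable x))]
          rw [ih ((t.dropWhile (fun x => !pvAIsBlank x && !pvAIsTable x)).dropWhile pvAIsBlank)
            (le_trans (List.length_dropWhile_le _ _) (le_trans (List.length_dropWhile_le _ _) hl'))]

-- ===== bridge: the staged B equals the grouped blocks =====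

def pvBB (ls : List String) : List (List String) :=
  (pvStage1 ls []).flatMap (fun s => pvCuts s [])

def pvRest : List String → List (List String)
  | [] => []
  | _ :: r => pvBB r

theorem pv_takeWhile_append (p : String → Bool) (xs ys : List String)
    (h : ∀ x ∈ xs, p x = true) : (xs ++ ys).takeWhile p = xs ++ ys.takeWhile p := by
  induction xs with
  | nil => simp
  | cons a l ih =>
    rw [List.cons_append, List.takeWhile_cons_of_pos (h a (by simp)), List.cons_append,
      ih (fun x hx => h x (by simp [hx]))]

theorem pv_dropWhile_append (p : String → Bool) (xs ys : List String)
    (h : ∀ x ∈ xs, p x = true) : (xs ++ ys).dropWhile p = ys.dropWhile p := by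
  induction xs with
  | nil => simp
  | cons a l ih =>
    rw [List.cons_append, List.dropWhile_cons_of_pos (h a (by simp)),
      ih (fun x hx => h x (by simp [hx]))]

theorem pv_takeWhile_takeWhile (p q : String → Bool) (ls : List String) :
    (ls.takeWhile p).takeWhile q = ls.takeWhile (fun x => p x && q x) := by
  induction ls with
  | nil => rfl
  | cons a l ih =>
    by_cases hp : p a = true
    · by_cases hq : q a = true
      · rw [List.takeWhile_cons_of_pos hp, List.takeWhile_cons_of_pos hq,
          List.takeWhile_cons_of_pos (by simp [hp, hq]), ih]
      · rw [List.takeWhile_cons_of_pos hp,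
          List.takeWhile_cons_of_neg (by simpa using hq),
          List.takeWhile_cons_of_neg (by simp [hq])]
    · rw [List.takeWhile_cons_of_neg (by simpa using hp),
        List.takeWhile_cons_of_neg (by simp [hp]), List.takeWhile_nil]

theorem pv_nb_iff (l : String) : pvNb l = true ↔ PySem.Str.strip l ≠ "" := by
  simp [pvNb]

-- pvStage1 with an accumulator, flat-mapped through pvCuts
theorem pv_stage_acc : ∀ (t seg : List String),
    (pvStage1 t seg).flatMap (fun s => pvCuts s []) =
      pvCuts (seg ++ t.takeWhile pvNb) [] ++ pvRest (t.dropWhile pvNb) := by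
  intro t
  induction t with
  | nil => intro seg; simp [pvStage1, pvRest]
  | cons l r ih =>
    intro seg
    by_cases hnb : pvNb l = true
    · rw [pvStage1, if_pos ((pv_nb_iff l).mp hnb), ih,
        List.takeWhile_cons_of_pos hnb, List.dropWhile_cons_of_pos hnb]
      simp [List.append_assoc]
    · have hnb' : pvNb l = false := by
        cases hc : pvNb l
        · rfl
        · exact absurd hc hnb
      have hs : ¬ PySem.Str.strip l ≠ "" := by
        intro hc
        exact hnb ((pv_nb_iff l).mpr hc)
      rw [pvStage1, if_neg hs,
        List.takeWhile_cons_of_neg (by simp [hnb']),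
        List.dropWhile_cons_of_neg (by simp [hnb'])]
      simp [pvRest, pvBB, List.append_nil]

theorem pv_cuts_nil_start (x : String) (r : List String) :
    pvCuts (x :: r) [] = pvCuts r [x] := by
  rw [pvCuts, if_neg (by simp)]
  rfl

-- pvCuts collects the run of the current piece's flag
theorem pv_cuts_run : ∀ (t piece : List String) (f : Bool), piece ≠ [] →
    pvAIsTable (piece.getLastD "") = f →
    pvCuts t piece = (piece ++ t.takeWhile (fun x => pvAIsTable x == f)) ::
      pvCuts (t.dropWhile (fun x => pvAIsTable x == f)) [] := by
  intro t
  induction t with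
  | nil =>
    intro piece f hne _
    rw [pvCuts, if_neg (by simpa using hne)]
    simp [pvCuts]
  | cons x r ih =>
    intro piece f hne hlast
    by_cases hx : pvAIsTable x = f
    · have hcond : ¬ (piece ≠ [] ∧
          PySem.Str.startswith (piece.getLastD "") "|" ≠ PySem.Str.startswith x "|") := by
        intro hc
        exact hc.2 (by
          show pvAIsTable (piece.getLastD "") = pvAIsTable x
          rw [hlast, hx])
      rw [pvCuts, if_neg hcond]
      rw [ih (piece ++ [x]) f (by simp) (by rw [List.getLastD_concat]; exact hx)]
      rw [List.takeWhile_cons_of_pos (by simp [hx]), List.dropWhile_cons_of_pos (by simp [hx])]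
      simp [List.append_assoc]
    · have hx' : pvAIsTable x = !f := by
        cases hc : pvAIsTable x
        · cases f
          · exact absurd hc (by simpa [hc] using hx)
          · rfl
        · cases f
          · rfl
          · exact absurd hc (by simpa [hc] using hx)
      have hcond : piece ≠ [] ∧
          PySem.Str.startswith (piece.getLastD "") "|" ≠ PySem.Str.startswith x "|" := by
        refine ⟨hne, ?_⟩
        show ¬ pvAIsTable (piece.getLastD "") = pvAIsTable x
        rw [hlast, hx']
        cases f <;> simp
      rw [pvCuts, if_pos hcond]
      rw [List.takeWhile_cons_of_neg (by rw [hx']; cases f <;> simp),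
        List.dropWhile_cons_of_neg (by rw [hx']; cases f <;> simp)]
      rw [pv_cuts_nil_start, List.append_nil]

theorem pv_bb_blank (l : String) (t : List String) (hb : pvAIsBlank l = true) :
    pvBB (l :: t) = pvBB t := by
  have hs : ¬ PySem.Str.strip l ≠ "" := by
    simp [pvAIsBlank] at hb
    simp [hb]
  unfold pvBB
  rw [pvStage1, if_neg hs]
  simp [pvCuts]

-- for a non-blank head, the kind-run predicate is "non-blank with the same table flag"
theorem pv_kind_eq_nonblank (l : String) (hbl : pvAIsBlank l = false) :
    (fun x => pvKind x == pvKind l) =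
      (fun x => pvNb x && (pvAIsTable x == pvAIsTable l)) := by
  funext x
  by_cases hf : pvAIsTable l = true
  · have hk : pvKind l = 0 := by
      unfold pvKind
      rw [if_pos (show PySem.Str.startswith l "|" = true from hf)]
    rw [hk, (pv_kind_cases x).1, hf]
    by_cases hx : pvAIsTable x = true
    · simp [hx, pvNb, show (PySem.Str.strip x == "") = false from pv_table_not_blank x hx]
    · simp [show pvAIsTable x = false from by cases hc : pvAIsTable x; rfl; exact absurd hc hx]
  · have hf' : pvAIsTable l = false := by
      cases hc : pvAIsTable l
      · rfl
      · exact absurd hc hf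
    have hk : pvKind l = 2 := by
      unfold pvKind
      rw [if_neg (by simpa using (show PySem.Str.startswith l "|" = false from hf')),
        if_neg (by simp [show (PySem.Str.strip l == "") = false from hbl])]
    rw [hk, (pv_kind_cases x).2.2, hf']
    cases hx : pvAIsTable x <;> cases hb : pvAIsBlank x <;>
      simp [pvNb, pvAIsBlank] at hb ⊢ <;> simp [hb]

-- the head of dropWhile fails the predicate
theorem pv_head_dropWhile (p : String → Bool) (ls : List String) (x : String)
    (r : List String) (h : ls.dropWhile p = x :: r) : p x = false := by
  induction ls with
  | nil => simp at h
  | cons a l ih =>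
    by_cases ha : p a = true
    · rw [List.dropWhile_cons_of_pos ha] at h
      exact ih h
    · rw [List.dropWhile_cons_of_neg ha] at h
      cases h
      cases hc : p x
      · rfl
      · exact absurd hc ha

-- the tail part of the staged decomposition, for a suffix that starts a new run
theorem pv_tail_eq (f : Bool) (u : List String)
    (h : u = [] ∨ ∃ x r, u = x :: r ∧ (pvNb x && (pvAIsTable x == f)) = false) :
    pvCuts ((u.takeWhile pvNb).dropWhile (fun x => pvAIsTable x == f)) [] ++
      pvRest (u.dropWhile pvNb) = pvBB u := by
  rcases h with rfl | ⟨x, r, rfl, hx⟩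
  · simp [pvCuts, pvRest, pvBB, pvStage1]
  · by_cases hnb : pvNb x = true
    · have hxf : (pvAIsTable x == f) = false := by
        cases hc : (pvAIsTable x == f)
        · rfl
        · rw [hnb, hc] at hx; simp at hx
      rw [List.takeWhile_cons_of_pos hnb, List.dropWhile_cons_of_neg (by simp [hxf]),
        List.dropWhile_cons_of_pos hnb]
      rw [show pvBB (x :: r) = (pvStage1 (x :: r) []).flatMap (fun s => pvCuts s []) from rfl,
        pv_stage_acc, List.nil_append, List.takeWhile_cons_of_pos hnb,
        List.dropWhile_cons_of_pos hnb]
    · have hnb' : pvNb x = false := by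
        cases hc : pvNb x
        · rfl
        · exact absurd hc hnb
      have hb : pvAIsBlank x = true := by
        simpa [pvNb, pvAIsBlank] using hnb'
      rw [List.takeWhile_cons_of_neg (by simp [hnb']),
        List.dropWhile_cons_of_neg (by simp [hnb'])]
      rw [pv_bb_blank x r hb]
      simp [pvCuts, pvRest]

-- main bridge: grouped blocks = staged blocks (joined and stripped)
theorem pv_bridge (n : Nat) : ∀ ls : List String, ls.length ≤ n →
    pvBBlocks (pvGroups ls) = (pvBB ls).map pvJs := by
  induction n with
  | zero =>
    intro ls hl
    have hnil : ls = [] := List.eq_nil_of_length_eq_zero (Nat.le_zero.mp hl)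
    subst hnil
    simp [pvGroups, pvBBlocks, pvBB, pvStage1, pvCuts]
  | succ n ih =>
    intro ls hl
    cases ls with
    | nil => simp [pvGroups, pvBBlocks, pvBB, pvStage1, pvCuts]
    | cons l t =>
      have hl' : t.length ≤ n := Nat.lt_succ_iff.mp (by simpa using hl)
      by_cases hbl : pvAIsBlank l = true
      · -- blank head: both sides skip it
        have htab : pvAIsTable l = false := by
          cases hx : pvAIsTable l
          · rfl
          · exact absurd hbl (by simp [pv_table_not_blank l hx])
        have hk : pvKind l = 1 := by
          unfold pvKind
          rw [if_neg (by simpa using (show PySem.Str.startswith l "|" = false from htab))]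
          rw [if_pos (show (PySem.Str.strip l == "") = true from hbl)]
        rw [pvGroups, pv_kind_one l hk, pvBBlocks, hk, if_neg (by decide)]
        rw [pv_groups_drop_blank t, ih t hl', pv_bb_blank l t hbl]
      · -- non-blank head: one run on each side, then the same remainder
        have hbl' : pvAIsBlank l = false := by
          cases hc : pvAIsBlank l
          · rfl
          · exact absurd hc hbl
        have hnb : pvNb l = true := by simpa [pvNb, pvAIsBlank] using hbl'
        have hk1 : pvKind l ≠ 1 := by
          intro hc
          rw [← (pv_kind_cases l).2.1, hc] at hbl'
          simp at hbl'
        have hpred : (fun x => pvKind x == pvKind l) =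
            (fun x => pvNb x && (pvAIsTable x == pvAIsTable l)) :=
          pv_kind_eq_nonblank l hbl'
        have hkne : (pvKind l != 1) = true := by
          cases hc : pvKind l != 1
          · exact absurd (by simpa using hc) hk1
          · rfl
        rw [pvGroups, hpred, pvBBlocks, if_pos hkne]
        -- the staged side
        rw [show pvBB (l :: t) = (pvStage1 (l :: t) []).flatMap (fun s => pvCuts s []) from rfl,
          pv_stage_acc, List.nil_append, List.takeWhile_cons_of_pos hnb,
          List.dropWhile_cons_of_pos hnb, pv_cuts_nil_start]
        rw [pv_cuts_run (t.takeWhile pvNb) [l] (pvAIsTable l) (by simp) (by rfl)]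
        rw [pv_takeWhile_takeWhile pvNb (fun x => pvAIsTable x == pvAIsTable l) t]
        have hmemQ : ∀ x ∈ t.takeWhile (fun x => pvNb x && (pvAIsTable x == pvAIsTable l)),
            (pvNb x && (pvAIsTable x == pvAIsTable l)) = true :=
          fun x hx =>
            List.mem_takeWhile_imp (p := fun x => pvNb x && (pvAIsTable x == pvAIsTable l)) hx
        have hmemNb : ∀ x ∈ t.takeWhile (fun x => pvNb x && (pvAIsTable x == pvAIsTable l)),
            pvNb x = true := by
          intro x hx
          exact (Bool.and_eq_true_iff.mp (hmemQ x hx)).1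
        have hmemF : ∀ x ∈ t.takeWhile (fun x => pvNb x && (pvAIsTable x == pvAIsTable l)),
            (fun x => pvAIsTable x == pvAIsTable l) x = true := by
          intro x hx
          exact (Bool.and_eq_true_iff.mp (hmemQ x hx)).2
        have htQ : t.takeWhile (fun x => pvNb x && (pvAIsTable x == pvAIsTable l)) ++
            t.dropWhile (fun x => pvNb x && (pvAIsTable x == pvAIsTable l)) = t :=
          List.takeWhile_append_dropWhile
        -- rewrite the two remainders through the decomposition of t
        have hTN : t.takeWhile pvNb =
            t.takeWhile (fun x => pvNb x && (pvAIsTable x == pvAIsTable l)) ++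
              (t.dropWhile (fun x => pvNb x && (pvAIsTable x == pvAIsTable l))).takeWhile pvNb := by
          conv_lhs => rw [← htQ]
          exact pv_takeWhile_append pvNb _ _ hmemNb
        have hDN : t.dropWhile pvNb =
            (t.dropWhile (fun x => pvNb x && (pvAIsTable x == pvAIsTable l))).dropWhile pvNb := by
          conv_lhs => rw [← htQ]
          exact pv_dropWhile_append pvNb _ _ hmemNb
        have hDF : (t.takeWhile pvNb).dropWhile (fun x => pvAIsTable x == pvAIsTable l) =
            ((t.dropWhile (fun x => pvNb x && (pvAIsTable x == pvAIsTable l))).takeWhile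
              pvNb).dropWhile (fun x => pvAIsTable x == pvAIsTable l) := by
          rw [hTN]
          exact pv_dropWhile_append _ _ _ hmemF
        rw [hDF, hDN]
        have hu : t.dropWhile (fun x => pvNb x && (pvAIsTable x == pvAIsTable l)) = [] ∨
            ∃ x r, t.dropWhile (fun x => pvNb x && (pvAIsTable x == pvAIsTable l)) = x :: r ∧
              (pvNb x && (pvAIsTable x == pvAIsTable l)) = false := by
          cases hc : t.dropWhile (fun x => pvNb x && (pvAIsTable x == pvAIsTable l)) with
          | nil => exact Or.inl rfl
          | cons x r =>
            exact Or.inr ⟨x, r, rfl, pv_head_dropWhile _ t x r hc⟩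
        rw [List.map_append, List.map_cons, List.cons_append, ← List.map_append, pv_tail_eq (pvAIsTable l) _ hu]
        rw [ih (t.dropWhile (fun x => pvNb x && (pvAIsTable x == pvAIsTable l)))
          (le_trans (List.length_dropWhile_le _ _) hl')]
        simp [pvJs]

-- ===== VERDICT (by name: the statement is the Claim_ definition above) =====
theorem split_paragraphs_and_tables_spec : Claim_equal_split_paragraphs_and_tables := by
  intro s _
  unfold Spec_split_paragraphs_and_tables split_paragraphs_and_tables split_paragraphs_and_tables_alt
  rw [pv_core ((PySem.Str.split? s "\n").getD []).length _ le_rfl,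
    pv_bridge ((PySem.Str.split? s "\n").getD []).length _ le_rfl]
  rfl
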